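-- pv_equiv track=rewrite | github.com/pypi-data/pypi-mirror-92 | packages/flinter/flinter-0.4.0a0-py3-none-any.whl/flinter/struct_analysis.py | get_ifdo_nesting
-- ===== SOURCE A (Python) =====
-- def get_ifdo_nesting(join_statements_lst):#clean_st, cur_ifdo, cur_depth):
--     """ Find the nesting of ifs and dos
--     """
--     cur_ifdo = 0
--     cur_depth = 0
--     for clean_st in join_statements_lst:
--         for st_match in ["if", "do"]:
--             if clean_st.startswith(st_match):
--                 cur_ifdo += 1
--                 cur_depth = max(cur_depth, cur_ifdo)
--
--             for ending in ["end", "end "]: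
--                 if clean_st.startswith(ending + st_match):
--                     cur_ifdo -= 1
--
--     return cur_depth
-- ===== SOURCE B (Python) =====
-- def get_ifdo_nesting(join_statements_lst):
--     """Find the nesting of ifs and dos, by divide and conquer: each segment is
--     summarized as (total depth delta, max prefix depth); two summaries combine
--     as (tL + tR, max(bL, tL + bR)), and the whole list's max prefix depth is
--     the answer."""
--     def delta(st):
--         if st.startswith(("if", "do")):
--             return 1
--         if st.startswith(("endif", "end if", "enddo", "end do")):
--             return -1
--         return 0
--
--     def summarize(seg):
--         if not seg:
--             return (0, 0)
--         if len(seg) == 1: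
--             d = delta(seg[0])
--             return (d, max(0, d))
--         mid = len(seg) // 2
--         tL, bL = summarize(seg[:mid])
--         tR, bR = summarize(seg[mid:])
--         return (tL + tR, max(bL, tL + bR))
--
--     return summarize(join_statements_lst)[1]
-- ===== Notes on version B (the rewrite author's own statement) =====
-- stated objective: alternative
-- what changed: Replaces A's fused single-pass counter loop with a divide-and-conquer: each half of the list is summarized as (total depth delta, max prefix depth) and the summaries are merged with the associative combine (tL+tR, max(bL, tL+bR)); no running counter or running max is maintained.
import Mathlib
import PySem

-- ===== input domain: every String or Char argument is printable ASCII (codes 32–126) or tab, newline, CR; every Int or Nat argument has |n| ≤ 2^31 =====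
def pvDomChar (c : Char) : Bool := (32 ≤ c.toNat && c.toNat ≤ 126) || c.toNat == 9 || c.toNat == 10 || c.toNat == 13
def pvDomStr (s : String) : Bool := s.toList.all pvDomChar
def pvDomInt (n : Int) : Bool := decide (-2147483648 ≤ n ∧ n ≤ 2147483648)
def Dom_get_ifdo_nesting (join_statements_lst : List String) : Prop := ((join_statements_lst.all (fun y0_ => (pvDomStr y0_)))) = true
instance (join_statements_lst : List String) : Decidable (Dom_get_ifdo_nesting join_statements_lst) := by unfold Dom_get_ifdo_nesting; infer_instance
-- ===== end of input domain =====

-- B replaces A's fused running-counter loop with a divide-and-conquer over segment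
-- summaries (total depth delta, max prefix depth) merged associatively; objective: alternative.

-- ===== PORT A =====
def get_ifdo_nesting (join_statements_lst : List String) : Int :=
  (join_statements_lst.foldl (fun (st : Int × Int) clean_st =>
    ["if", "do"].foldl (fun (st : Int × Int) st_match =>
      let st := if PySem.Str.startswith clean_st st_match then
          (st.1 + 1, max st.2 (st.1 + 1)) else st
      ["end", "end "].foldl (fun (st : Int × Int) ending =>
        if PySem.Str.startswith clean_st (ending ++ st_match) then (st.1 - 1, st.2)
        else st) st) st) ((0 : Int), (0 : Int))).2

-- ===== PORT B =====
-- Source B's delta classification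
def pvDelta (st : String) : Int :=
  if PySem.Str.startswith st "if" || PySem.Str.startswith st "do" then 1
  else if PySem.Str.startswith st "endif" || PySem.Str.startswith st "end if" ||
          PySem.Str.startswith st "enddo" || PySem.Str.startswith st "end do" then -1
  else 0

-- Source B's summarize: divide and conquer on the segment (seg[:mid] / seg[mid:] = take/drop)
def pvSummarize (seg : List String) : Int × Int :=
  match seg with
  | [] => ((0 : Int), (0 : Int))
  | [s] => (pvDelta s, max 0 (pvDelta s))
  | a :: b :: rest =>
    let seg' := a :: b :: rest
    let mid := seg'.length / 2
    let L := pvSummarize (seg'.take mid)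
    let R := pvSummarize (seg'.drop mid)
    (L.1 + R.1, max L.2 (L.1 + R.2))
termination_by seg.length
decreasing_by
  · simp only [List.length_take, List.length_cons]; omega
  · simp only [List.length_drop, List.length_cons]; omega

def get_ifdo_nesting_alt (join_statements_lst : List String) : Int :=
  (pvSummarize join_statements_lst).2

-- ===== PRECONDITION & SPEC =====
def Spec_get_ifdo_nesting (join_statements_lst : List String) (out : Int) : Prop := out = get_ifdo_nesting_alt join_statements_lst
instance (join_statements_lst : List String) (out : Int) : Decidable (Spec_get_ifdo_nesting join_statements_lst out) := by unfold Spec_get_ifdo_nesting; infer_instance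

-- ===== CLAIM =====
def Claim_equal_get_ifdo_nesting : Prop := ∀ (join_statements_lst : List String), Dom_get_ifdo_nesting join_statements_lst → Spec_get_ifdo_nesting join_statements_lst (get_ifdo_nesting join_statements_lst)

-- ===== LEMMAS AND PROOFS =====

-- A's loop body, named for the proofs (definitionally the port's lambda)
def pvStepA (st : Int × Int) (clean_st : String) : Int × Int :=
  ["if", "do"].foldl (fun (st : Int × Int) st_match =>
    let st := if PySem.Str.startswith clean_st st_match then
        (st.1 + 1, max st.2 (st.1 + 1)) else st
    ["end", "end "].foldl (fun (st : Int × Int) ending =>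
      if PySem.Str.startswith clean_st (ending ++ st_match) then (st.1 - 1, st.2)
      else st) st) st

-- the delta-based step A's body reduces to
def pvStepB (st : Int × Int) (s : String) : Int × Int :=
  (st.1 + pvDelta s, if st.1 + pvDelta s > st.2 then st.1 + pvDelta s else st.2)

-- max prefix sum (over all prefixes, including the empty one) of a delta list
def pvMaxPref : List Int → Int
  | [] => 0
  | d :: ds => max 0 (d + pvMaxPref ds)

lemma pvMaxPref_nonneg (l : List Int) : 0 ≤ pvMaxPref l := by
  cases l <;> simp [pvMaxPref]

lemma pvMaxPref_append (L R : List Int) :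
    pvMaxPref (L ++ R) = max (pvMaxPref L) (L.sum + pvMaxPref R) := by
  induction L with
  | nil => simp [pvMaxPref, pvMaxPref_nonneg R]
  | cons d L ih =>
      simp only [List.cons_append, pvMaxPref, ih, List.sum_cons, Int.max_def]
      split_ifs <;> omega

-- two startswith tests with incomparable patterns cannot both succeed
lemma pv_not_both {s p q : String}
    (hpq : ¬ (p.toList <+: q.toList) ∧ ¬ (q.toList <+: p.toList))
    (hp : PySem.Str.startswith s p = true) (hq : PySem.Str.startswith s q = true) : False := by
  rw [PySem.Str.startswith_eq, PySem.Chars.startswith_iff] at hp hq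
  rcases List.prefix_or_prefix_of_prefix hp hq with h | h
  exacts [hpq.1 h, hpq.2 h]

-- A's per-statement step, given the invariant c ≤ d, is exactly the delta-based step
set_option maxHeartbeats 2000000 in
lemma pv_step_eq (c d : Int) (h : c ≤ d) (s : String) :
    pvStepA (c, d) s = pvStepB (c, d) s := by
  have e1 : ("end" : String) ++ "if" = "endif" := rfl
  have e2 : ("end " : String) ++ "if" = "end if" := rfl
  have e3 : ("end" : String) ++ "do" = "enddo" := rfl
  have e4 : ("end " : String) ++ "do" = "end do" := rfl
  simp only [pvStepA, pvStepB, List.foldl, e1, e2, e3, e4, pvDelta]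
  by_cases h1 : PySem.Str.startswith s "if" = true <;>
  by_cases h2 : PySem.Str.startswith s "do" = true <;>
  by_cases h3 : PySem.Str.startswith s "endif" = true <;>
  by_cases h4 : PySem.Str.startswith s "end if" = true <;>
  by_cases h5 : PySem.Str.startswith s "enddo" = true <;>
  by_cases h6 : PySem.Str.startswith s "end do" = true <;>
  first
    | (exact (pv_not_both (by decide) h1 h2).elim)
    | (exact (pv_not_both (by decide) h1 h3).elim)
    | (exact (pv_not_both (by decide) h1 h4).elim)
    | (exact (pv_not_both (by decide) h1 h5).elim)
    | (exact (pv_not_both (by decide) h1 h6).elim)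
    | (exact (pv_not_both (by decide) h2 h3).elim)
    | (exact (pv_not_both (by decide) h2 h4).elim)
    | (exact (pv_not_both (by decide) h2 h5).elim)
    | (exact (pv_not_both (by decide) h2 h6).elim)
    | (exact (pv_not_both (by decide) h3 h4).elim)
    | (exact (pv_not_both (by decide) h3 h5).elim)
    | (exact (pv_not_both (by decide) h3 h6).elim)
    | (exact (pv_not_both (by decide) h4 h5).elim)
    | (exact (pv_not_both (by decide) h4 h6).elim)
    | (exact (pv_not_both (by decide) h5 h6).elim)
    | (simp only [h1, h2, h3, h4, h5, h6, if_true, if_false, Bool.false_eq_true,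
        Bool.or_true, Bool.or_false, Bool.or_self, Prod.mk.injEq]
       ; constructor <;> (try rw [Int.max_def]) <;> (try split_ifs) <;> (first | trivial | omega))

-- A's fold computes max d (c + max prefix sum of the deltas), from any state with c ≤ d
lemma pv_foldA (l : List String) : ∀ (c d : Int), c ≤ d →
    (List.foldl pvStepA (c, d) l).2 = max d (c + pvMaxPref (l.map pvDelta)) := by
  induction l with
  | nil => intro c d h; simp [pvMaxPref]; omega
  | cons x xs ih =>
      intro c d h
      rw [List.foldl_cons, pv_step_eq c d h x]
      have hδ : pvDelta x = 1 ∨ pvDelta x = 0 ∨ pvDelta x = -1 := by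
        unfold pvDelta; split_ifs <;> simp
      have hn := pvMaxPref_nonneg (xs.map pvDelta)
      have h2 : (pvStepB (c, d) x).1 ≤ (pvStepB (c, d) x).2 := by
        dsimp only [pvStepB]; split_ifs with hx <;> omega
      calc (List.foldl pvStepA (pvStepB (c, d) x) xs).2
          = (List.foldl pvStepA ((pvStepB (c, d) x).1, (pvStepB (c, d) x).2) xs).2 := by rfl
        _ = max (pvStepB (c, d) x).2 ((pvStepB (c, d) x).1 + pvMaxPref (xs.map pvDelta)) :=
            ih _ _ h2
        _ = max d (c + pvMaxPref ((x :: xs).map pvDelta)) := by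
            dsimp only [pvStepB, List.map_cons, pvMaxPref]
            rw [Int.max_def, Int.max_def, Int.max_def]
            split_ifs <;> omega

-- B's divide-and-conquer summary is (sum of deltas, max prefix sum of deltas)
lemma pvSummarize_eq (seg : List String) :
    pvSummarize seg = ((seg.map pvDelta).sum, pvMaxPref (seg.map pvDelta)) := by
  fun_induction pvSummarize seg with
  | case1 => simp [pvMaxPref]
  | case2 s => simp [pvMaxPref]
  | case3 a b rest seg' mid L R ihT ihD =>
      simp only [seg', mid, L, R] at ihT ihD ⊢
      rw [ihT, ihD]
      have hsplit : (a :: b :: rest) =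
          (a :: b :: rest).take ((a :: b :: rest).length / 2) ++
          (a :: b :: rest).drop ((a :: b :: rest).length / 2) := by
        rw [List.take_append_drop]
      conv_rhs => rw [hsplit]
      rw [List.map_append, List.sum_append, pvMaxPref_append]

-- ===== VERDICT =====
theorem get_ifdo_nesting_spec : Claim_equal_get_ifdo_nesting := by
  intro l _
  show (List.foldl pvStepA ((0 : Int), (0 : Int)) l).2 = (pvSummarize l).2
  rw [pv_foldA l 0 0 le_rfl, pvSummarize_eq]
  have := pvMaxPref_nonneg (l.map pvDelta)
  simp; omega
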